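-- pv_equiv track=rewrite | github.com/ThineLord/About-losses | data/movielens.py | split_leave_one_out
-- ===== SOURCE A (Python) =====
-- from typing import Dict, List, Set, Tuple
--
-- def split_leave_one_out(interactions: List[Tuple[int, int]], num_users: int) -> Tuple[List[Tuple[int, int]], Dict[int, Set[int]], Dict[int, Set[int]]]:
--     """
--     简单的 per-user 留一划分：最后一个作为测试，倒数第二个作为验证，其余作为训练。
--     返回 (train, val_dict, test_dict)。val/test 为 {user: {items...}}
--     注意：此处假设 interactions 已按时间排序；如果没有时间戳，我们按读入顺序。
--     """
--     user_hist: List[List[int]] = [[] for _ in range(num_users)]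
--     for u, i in interactions:
--         user_hist[u].append(i)
--
--     train: List[Tuple[int, int]] = []
--     val: Dict[int, Set[int]] = {}
--     test: Dict[int, Set[int]] = {}
--     for u in range(num_users):
--         hist = user_hist[u]
--         if len(hist) == 0:
--             continue
--         if len(hist) >= 2:
--             test[u] = {hist[-1]}
--             val[u] = {hist[-2]}
--             for i in hist[:-2]:
--                 train.append((u, i))
--         else:
--             test[u] = {hist[-1]}
--     return train, val, test
-- ===== SOURCE B (Python) =====
-- from typing import Dict, List, Set, Tuple
--
-- def split_leave_one_out(interactions: List[Tuple[int, int]], num_users: int) -> Tuple[List[Tuple[int, int]], Dict[int, Set[int]], Dict[int, Set[int]]]: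
--     # One pass over the flat stream keeping only each user's last item, second-to-last
--     # item and the train bucket, instead of materialising full per-user histories and slicing.
--     last: List = [None] * num_users
--     second: List = [None] * num_users
--     buckets: List[List[int]] = [[] for _ in range(num_users)]
--     for u, i in interactions:
--         if second[u] is not None:
--             buckets[u].append(second[u])
--         second[u] = last[u]
--         last[u] = i
--
--     train: List[Tuple[int, int]] = []
--     val: Dict[int, Set[int]] = {}
--     test: Dict[int, Set[int]] = {}
--     for u in range(num_users):
--         if last[u] is None:
--             continue
--         test[u] = {last[u]}
--         if second[u] is not None:
--             val[u] = {second[u]}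
--             train.extend((u, i) for i in buckets[u])
--     return train, val, test
-- ===== Notes on version B (the rewrite author's own statement) =====
-- stated objective: alternative
-- what changed: B replaces A's per-user history lists (built first, then sliced user by user) with a single pass over the flat interaction stream that keeps only each user's last item, second-to-last item and its train bucket, followed by a per-user assembly loop with no slicing.
-- outside the precondition, e.g. on split_leave_one_out([(5, 1)], 2): A raises IndexError, B raises IndexError
import Mathlib
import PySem

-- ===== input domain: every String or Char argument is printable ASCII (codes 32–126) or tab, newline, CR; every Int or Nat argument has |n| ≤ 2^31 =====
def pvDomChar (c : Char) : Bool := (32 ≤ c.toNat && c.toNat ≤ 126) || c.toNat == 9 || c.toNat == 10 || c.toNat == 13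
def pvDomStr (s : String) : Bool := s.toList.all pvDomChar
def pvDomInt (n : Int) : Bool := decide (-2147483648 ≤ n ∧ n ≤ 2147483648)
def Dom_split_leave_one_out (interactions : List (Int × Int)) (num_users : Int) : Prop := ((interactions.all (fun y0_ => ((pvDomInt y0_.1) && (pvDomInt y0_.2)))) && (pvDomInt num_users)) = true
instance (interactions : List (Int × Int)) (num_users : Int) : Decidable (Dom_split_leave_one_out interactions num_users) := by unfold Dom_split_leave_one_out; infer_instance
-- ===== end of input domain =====

-- B replaces A's per-user history lists (built, then sliced per user) by a single pass that
-- keeps only each user's last item, second-to-last item and its train bucket; same cost class.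

-- ===== PORT A =====
def split_leave_one_out (interactions : List (Int × Int)) (num_users : Int) :
    (List (Int × Int)) × (List (Int × List Int)) × (List (Int × List Int)) :=
  -- user_hist = [[] for _ in range(num_users)]; for u, i in interactions: user_hist[u].append(i)
  let user_hist : List (List Int) :=
    interactions.foldl
      (fun h p => PySem.List.pySetD h p.1 (PySem.List.pyGetD h p.1 [] ++ [p.2]))
      (List.replicate num_users.toNat ([] : List Int))
  -- for u in range(num_users): hist = user_hist[u]; …  — ported as enumerate(user_hist), exact
  -- since len(user_hist) = max(num_users, 0) = len(range(num_users)); val/test are Python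
  -- dicts (keys are fresh here, so insert appends)
  let r :=
    (user_hist.foldl
      (fun (p : ((List (Int × Int)) × (PySem.Dict Int (List Int)) × (PySem.Dict Int (List Int))) × Int) hist =>
        (if hist.length = 0 then p.1
         else if 2 ≤ hist.length then
           ((PySem.List.slice hist none (some (-2))).foldl (fun t i => t ++ [(p.2, i)]) p.1.1,
            PySem.Dict.insert p.1.2.1 p.2 [PySem.List.pyGetD hist (-2) 0],
            PySem.Dict.insert p.1.2.2 p.2 [PySem.List.pyGetD hist (-1) 0])
         else (p.1.1, p.1.2.1, PySem.Dict.insert p.1.2.2 p.2 [PySem.List.pyGetD hist (-1) 0]),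
         p.2 + 1))
      (([], ⟨[]⟩, ⟨[]⟩), 0)).1
  (r.1, r.2.1.items, r.2.2.items)

-- ===== PORT B =====
-- tail-recursive simultaneous traversal of the three parallel state lists (stack-safe zip)
def pvZip3Aux (acc : List (Option Int × Option Int × List Int)) :
    List (Option Int) → List (Option Int) → List (List Int) →
      List (Option Int × Option Int × List Int)
  | a :: as, b :: bs, c :: cs => pvZip3Aux ((a, b, c) :: acc) as bs cs
  | _, _, _ => acc.reverse

def pvZip3 (as : List (Option Int)) (bs : List (Option Int)) (cs : List (List Int)) :
    List (Option Int × Option Int × List Int) := pvZip3Aux [] as bs cs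

def split_leave_one_out_alt (interactions : List (Int × Int)) (num_users : Int) :
    (List (Int × Int)) × (List (Int × List Int)) × (List (Int × List Int)) :=
  -- one pass: last/second/buckets, all of length num_users
  let st :=
    interactions.foldl
      (fun (st : List (Option Int) × List (Option Int) × List (List Int)) p =>
        let bk :=
          match PySem.List.pyGetD st.2.1 p.1 none with
          | some v => PySem.List.pySetD st.2.2 p.1 (PySem.List.pyGetD st.2.2 p.1 [] ++ [v])
          | none => st.2.2
        (PySem.List.pySetD st.1 p.1 (some p.2),
         PySem.List.pySetD st.2.1 p.1 (PySem.List.pyGetD st.1 p.1 none),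
         bk))
      (List.replicate num_users.toNat (none : Option Int),
       List.replicate num_users.toNat (none : Option Int),
       List.replicate num_users.toNat ([] : List Int))
  -- assembly: for u in range(num_users): last[u], second[u], buckets[u] — ported as
  -- enumerate(zip(last, zip(second, buckets))), exact since all three have length max(num_users, 0)
  let r :=
    ((pvZip3 st.1 st.2.1 st.2.2).foldl
      (fun (p : ((List (Int × Int)) × (PySem.Dict Int (List Int)) × (PySem.Dict Int (List Int))) × Int) t =>
        (match t.1 with
         | none => p.1
         | some l =>
           match t.2.1 with
           | none => (p.1.1, p.1.2.1, PySem.Dict.insert p.1.2.2 p.2 [l])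
           | some s =>
             (p.1.1 ++ t.2.2.map (fun i => (p.2, i)),
              PySem.Dict.insert p.1.2.1 p.2 [s], PySem.Dict.insert p.1.2.2 p.2 [l]),
         p.2 + 1))
      (([], ⟨[]⟩, ⟨[]⟩), 0)).1
  (r.1, r.2.1.items, r.2.2.items)

-- ===== PRECONDITION & SPEC =====
-- Pre_ excludes exactly the inputs where Python A raises IndexError: a user id outside [-num_users, num_users).
def Pre_split_leave_one_out (interactions : List (Int × Int)) (num_users : Int) : Prop :=
  (interactions.all (fun p => decide (-num_users ≤ p.1 ∧ p.1 < num_users))) = true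
instance (interactions : List (Int × Int)) (num_users : Int) : Decidable (Pre_split_leave_one_out interactions num_users) := by unfold Pre_split_leave_one_out; infer_instance
def pvWitness_split_leave_one_out : (List (Int × Int)) × Int := ([(0, 1), (0, 2), (1, 5), (0, 3), (-1, 7)], 2)

def Spec_split_leave_one_out (interactions : List (Int × Int)) (num_users : Int) (out : (List (Int × Int)) × (List (Int × List Int)) × (List (Int × List Int))) : Prop := out = split_leave_one_out_alt interactions num_users
instance (interactions : List (Int × Int)) (num_users : Int) (out : (List (Int × Int)) × (List (Int × List Int)) × (List (Int × List Int))) : Decidable (Spec_split_leave_one_out interactions num_users out) := by unfold Spec_split_leave_one_out; infer_instance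

-- ===== CLAIM (what is proved, stated in full; the proofs are below) =====
def Claim_equal_split_leave_one_out : Prop := ∀ (interactions : List (Int × Int)) (num_users : Int), Dom_split_leave_one_out interactions num_users → Pre_split_leave_one_out interactions num_users → Spec_split_leave_one_out interactions num_users (split_leave_one_out interactions num_users)

-- ===== LEMMAS AND PROOFS =====

-- normalized Python index for -m ≤ i < m
def pvNidx (m : Nat) (i : Int) : Nat := if i < 0 then (i + m).toNat else i.toNat

theorem pvNidx_lt {m : Nat} {i : Int} (h1 : -(m : Int) ≤ i) (h2 : i < m) : pvNidx m i < m := by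
  unfold pvNidx; split <;> omega

theorem pyIdx?_eq {m : Nat} {i : Int} (h1 : -(m : Int) ≤ i) (h2 : i < m) :
    PySem.List.pyIdx? m i = some (pvNidx m i) := by
  simp only [PySem.List.pyIdx?, pvNidx]
  split_ifs <;> (try congr 1) <;> omega

theorem pySetD_eq {α : Type} {xs : List α} {i : Int} (v : α)
    (h1 : -(xs.length : Int) ≤ i) (h2 : i < xs.length) :
    PySem.List.pySetD xs i v = xs.set (pvNidx xs.length i) v := by
  simp [PySem.List.pySetD, PySem.List.pySet?, pyIdx?_eq h1 h2]

theorem pyGetD_eq {α : Type} {xs : List α} {i : Int} (d : α)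
    (h1 : -(xs.length : Int) ≤ i) (h2 : i < xs.length) :
    PySem.List.pyGetD xs i d = xs.getD (pvNidx xs.length i) d := by
  rw [List.getD_eq_getElem xs d (pvNidx_lt h1 h2)]
  by_cases hneg : i < 0
  · obtain ⟨k, hk0, rfl⟩ : ∃ k : Nat, 0 < k ∧ i = -(k : Int) := ⟨(-i).toNat, by omega, by omega⟩
    rw [PySem.List.pyGetD_neg_natCast xs k d (by omega) (by omega)]
    congr 1; unfold pvNidx; split <;> omega
  · rw [PySem.List.pyGetD_eq_getElem xs d (by omega) h2]
    congr 1; unfold pvNidx; split <;> omega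

theorem pvSetSelf {α : Type} (l : List α) (j : Nat) (v : α) (hv : l[j]? = some v) : l.set j v = l := by
  have hj : j < l.length := by
    by_contra hc
    rw [List.getElem?_eq_none (by omega)] at hv
    simp at hv
  apply List.ext_getElem?
  intro n
  rw [List.getElem?_set]
  split <;> simp_all

-- the one-pass state of B is determined by A's user_hist
def pvRel (h : List (List Int)) : List (Option Int) × List (Option Int) × List (List Int) :=
  (h.map List.getLast?, h.map (fun l => l.dropLast.getLast?), h.map (fun l => l.dropLast.dropLast))

theorem fold_inv (L : List (Int × Int)) (h : List (List Int))
    (hb : ∀ p ∈ L, -(h.length : Int) ≤ p.1 ∧ p.1 < (h.length : Int)) :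
    L.foldl
      (fun (st : List (Option Int) × List (Option Int) × List (List Int)) p =>
        let bk :=
          match PySem.List.pyGetD st.2.1 p.1 none with
          | some v => PySem.List.pySetD st.2.2 p.1 (PySem.List.pyGetD st.2.2 p.1 [] ++ [v])
          | none => st.2.2
        (PySem.List.pySetD st.1 p.1 (some p.2),
         PySem.List.pySetD st.2.1 p.1 (PySem.List.pyGetD st.1 p.1 none),
         bk))
      (pvRel h)
    = pvRel (L.foldl
        (fun h p => PySem.List.pySetD h p.1 (PySem.List.pyGetD h p.1 [] ++ [p.2])) h) := by
  induction L generalizing h with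
  | nil => rfl
  | cons p L ih =>
    have hp := hb p (by simp)
    have hj : pvNidx h.length p.1 < h.length := pvNidx_lt hp.1 hp.2
    have eget : ∀ {β : Type} (f : List Int → β) (d : β),
        PySem.List.pyGetD (h.map f) p.1 d = f (h[pvNidx h.length p.1]'hj) := by
      intro β f d
      rw [pyGetD_eq d (by simpa using hp.1) (by simpa using hp.2)]
      simp only [List.length_map]
      rw [List.getD_eq_getElem _ _ (by simpa using hj)]
      simp
    have eset : ∀ {β : Type} (f : List Int → β) (v : β),
        PySem.List.pySetD (h.map f) p.1 v = (h.map f).set (pvNidx h.length p.1) v := by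
      intro β f v
      rw [pySetD_eq v (by simpa using hp.1) (by simpa using hp.2)]
      simp only [List.length_map]
    have estepA : PySem.List.pySetD h p.1 (PySem.List.pyGetD h p.1 [] ++ [p.2])
        = h.set (pvNidx h.length p.1) ((h[pvNidx h.length p.1]'hj) ++ [p.2]) := by
      rw [pySetD_eq _ hp.1 hp.2, pyGetD_eq _ hp.1 hp.2, List.getD_eq_getElem _ _ hj]
    have key : (let bk :=
          match PySem.List.pyGetD (pvRel h).2.1 p.1 none with
          | some v => PySem.List.pySetD (pvRel h).2.2 p.1 (PySem.List.pyGetD (pvRel h).2.2 p.1 [] ++ [v])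
          | none => (pvRel h).2.2
        ((PySem.List.pySetD (pvRel h).1 p.1 (some p.2),
          PySem.List.pySetD (pvRel h).2.1 p.1 (PySem.List.pyGetD (pvRel h).1 p.1 none),
          bk) : List (Option Int) × List (Option Int) × List (List Int)))
        = pvRel (PySem.List.pySetD h p.1 (PySem.List.pyGetD h p.1 [] ++ [p.2])) := by
      rw [estepA]
      simp only [pvRel, eget, eset, List.map_set, List.getLast?_concat, List.dropLast_concat]
      refine congrArg₂ Prod.mk rfl (congrArg₂ Prod.mk rfl ?_)
      rcases hv : (h[pvNidx h.length p.1]'hj).dropLast.getLast? with _ | v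
      · -- the user had fewer than 2 items: dropLast = [], set is a no-op
        have hnil : (h[pvNidx h.length p.1]'hj).dropLast = [] := List.getLast?_eq_none_iff.mp hv
        rw [hnil]
        refine (pvSetSelf _ _ _ ?_).symm
        rw [List.getElem?_map, List.getElem?_eq_getElem hj]
        simp [hnil]
      · change (List.map (fun l => l.dropLast.dropLast) h).set (pvNidx h.length p.1)
            (h[pvNidx h.length p.1].dropLast.dropLast ++ [v]) = _
        congr 1
        exact List.dropLast_append_getLast? v hv
    simp only [List.foldl_cons]
    rw [key, ih]
    intro q hq
    have := hb q (by simp [hq])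
    simpa [PySem.List.length_pySetD] using this

theorem pvZip3Aux_eq (acc : List (Option Int × Option Int × List Int))
    (as : List (Option Int)) (bs : List (Option Int)) (cs : List (List Int)) :
    pvZip3Aux acc as bs cs = acc.reverse ++ as.zip (bs.zip cs) := by
  induction as generalizing acc bs cs with
  | nil => simp [pvZip3Aux]
  | cons a as ih =>
    cases bs with
    | nil => simp [pvZip3Aux]
    | cons b bs =>
      cases cs with
      | nil => simp [pvZip3Aux]
      | cons c cs => simp [pvZip3Aux, ih]

theorem pvZip3_eq (as : List (Option Int)) (bs : List (Option Int)) (cs : List (List Int)) :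
    pvZip3 as bs cs = as.zip (bs.zip cs) := by
  simp [pvZip3, pvZip3Aux_eq]

theorem pvEnumMap {α β : Type} (F : α → β) (H : List α) (st : Int) :
    PySem.List.enumerate (H.map F) st = (PySem.List.enumerate H st).map (fun e => (e.1, F e.2)) := by
  induction H generalizing st with
  | nil => simp [PySem.List.enumerate_nil]
  | cons x H ih => simp [PySem.List.enumerate_cons, ih]

theorem pvFoldIdx {α β : Type} (xs : List α) (f : β → Int → α → β) (acc : β) (s : Int) :
    (xs.foldl (fun p x => (f p.1 p.2 x, p.2 + 1)) (acc, s)).1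
      = (PySem.List.enumerate xs s).foldl (fun b e => f b e.1 e.2) acc := by
  induction xs generalizing acc s with
  | nil => rfl
  | cons x xs ih => simp [PySem.List.enumerate_cons, List.foldl_cons, ih]

theorem pvAssemble (H : List (List Int))
    (init : (List (Int × Int)) × (PySem.Dict Int (List Int)) × (PySem.Dict Int (List Int))) :
    (PySem.List.enumerate ((pvRel H).1.zip ((pvRel H).2.1.zip (pvRel H).2.2))).foldl
      (fun (acc : (List (Int × Int)) × (PySem.Dict Int (List Int)) × (PySem.Dict Int (List Int))) e =>
        match e.2.1 with
        | none => acc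
        | some l =>
          match e.2.2.1 with
          | none => (acc.1, acc.2.1, PySem.Dict.insert acc.2.2 e.1 [l])
          | some s =>
            (acc.1 ++ e.2.2.2.map (fun i => (e.1, i)),
             PySem.Dict.insert acc.2.1 e.1 [s], PySem.Dict.insert acc.2.2 e.1 [l])) init
    = (PySem.List.enumerate H).foldl
      (fun (acc : (List (Int × Int)) × (PySem.Dict Int (List Int)) × (PySem.Dict Int (List Int))) e =>
        if e.2.length = 0 then acc
        else if 2 ≤ e.2.length then
          ((PySem.List.slice e.2 none (some (-2))).foldl (fun t i => t ++ [(e.1, i)]) acc.1,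
           PySem.Dict.insert acc.2.1 e.1 [PySem.List.pyGetD e.2 (-2) 0],
           PySem.Dict.insert acc.2.2 e.1 [PySem.List.pyGetD e.2 (-1) 0])
        else (acc.1, acc.2.1, PySem.Dict.insert acc.2.2 e.1 [PySem.List.pyGetD e.2 (-1) 0])) init := by
  have hzip : (pvRel H).1.zip ((pvRel H).2.1.zip (pvRel H).2.2)
      = H.map (fun l => (l.getLast?, l.dropLast.getLast?, l.dropLast.dropLast)) := by
    simp only [pvRel]
    rw [List.zip_map', List.zip_map']
  rw [hzip, pvEnumMap, List.foldl_map]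
  apply PySem.List.foldl_congr_mem
  intro acc e _
  obtain ⟨u, l⟩ := e
  dsimp only
  rcases hL : l.getLast? with _ | a
  · -- empty history
    have hnil : l = [] := List.getLast?_eq_none_iff.mp hL
    rw [hnil]
    simp
  · have hne : l ≠ [] := by
      intro hc; rw [hc] at hL; simp at hL
    have hlast : l.getLast hne = a := by
      have h2 := List.getLast?_eq_some_getLast hne
      rw [hL] at h2
      exact (Option.some_inj.mp h2).symm
    rcases hS : l.dropLast.getLast? with _ | s
    · -- exactly one item
      have hd : l.dropLast = [] := List.getLast?_eq_none_iff.mp hS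
      have h1 : l.length = 1 := by
        have hld : l.dropLast.length = l.length - 1 := List.length_dropLast
        have hpos : l.length ≠ 0 := by simpa [List.length_eq_zero_iff] using hne
        rw [hd] at hld; simp at hld; omega
      rw [if_neg (by omega), if_neg (by omega)]
      rw [PySem.List.pyGetD_neg_one _ 0 hne, hlast]
    · -- at least two items
      obtain ⟨l', hl'⟩ := List.getLast?_eq_some_iff.mp hS
      have hl : l = l' ++ [s, a] := by
        conv_lhs => rw [← List.dropLast_append_getLast hne]
        rw [hl', hlast]
        simp
      have hlen2 : l.length = l'.length + 2 := by rw [hl]; simp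
      rw [if_neg (by omega), if_pos (by omega)]
      have hslice : PySem.List.slice l none (some (-2)) = l' := by
        rw [PySem.List.slice_to_neg_ofNat _ 2 (by omega), hlen2, hl]
        simp
      have hm2 : PySem.List.pyGetD l (-2) 0 = s := by
        rw [PySem.List.pyGetD_neg_ofNat _ 2 0 (by omega) (by omega)]
        simp [hl]
      have hm1 : PySem.List.pyGetD l (-1) 0 = a := by
        rw [PySem.List.pyGetD_neg_one _ 0 hne, hlast]
      rw [hslice, hm2, hm1, hl']
      rw [List.dropLast_concat]
      rw [PySem.List.foldl_append_singleton_eq_map (fun i => (u, i)) l' acc.1]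

theorem split_leave_one_out_spec : Claim_equal_split_leave_one_out := by
  intro interactions num_users _hdom hpre
  unfold Pre_split_leave_one_out at hpre
  rw [List.all_eq_true] at hpre
  have hb : ∀ p ∈ interactions,
      -((List.replicate num_users.toNat ([] : List Int)).length : Int) ≤ p.1 ∧
        p.1 < ((List.replicate num_users.toNat ([] : List Int)).length : Int) := by
    intro p hp
    have := of_decide_eq_true (hpre p hp)
    simp only [List.length_replicate]
    omega
  unfold Spec_split_leave_one_out split_leave_one_out split_leave_one_out_alt
  have hfold := fold_inv interactions (List.replicate num_users.toNat ([] : List Int)) hb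
  have hinit : pvRel (List.replicate num_users.toNat ([] : List Int))
      = (List.replicate num_users.toNat (none : Option Int),
         List.replicate num_users.toNat (none : Option Int),
         List.replicate num_users.toNat ([] : List Int)) := by
    simp [pvRel, List.map_replicate]
  rw [hinit] at hfold
  simp only [hfold, pvZip3_eq]
  rw [pvFoldIdx _ (fun (acc : (List (Int × Int)) × (PySem.Dict Int (List Int)) × (PySem.Dict Int (List Int))) (u : Int) (t : Option Int × Option Int × List Int) =>
        match t.1 with
        | none => acc
        | some l =>
          match t.2.1 with
          | none => (acc.1, acc.2.1, PySem.Dict.insert acc.2.2 u [l])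
          | some s =>
            (acc.1 ++ t.2.2.map (fun i => (u, i)),
             PySem.Dict.insert acc.2.1 u [s], PySem.Dict.insert acc.2.2 u [l]))]
  rw [pvFoldIdx _ (fun (acc : (List (Int × Int)) × (PySem.Dict Int (List Int)) × (PySem.Dict Int (List Int))) (u : Int) (hist : List Int) =>
        if hist.length = 0 then acc
        else if 2 ≤ hist.length then
          ((PySem.List.slice hist none (some (-2))).foldl (fun t i => t ++ [(u, i)]) acc.1,
           PySem.Dict.insert acc.2.1 u [PySem.List.pyGetD hist (-2) 0],
           PySem.Dict.insert acc.2.2 u [PySem.List.pyGetD hist (-1) 0])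
        else (acc.1, acc.2.1, PySem.Dict.insert acc.2.2 u [PySem.List.pyGetD hist (-1) 0]))]
  rw [pvAssemble]
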